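-- pv_equiv track=rewrite | github.com/SuQinghang/CoursesCode | Cryptology_Exp/code/AES/AES.py | MixMatrix
-- ===== SOURCE A (Python) =====
-- def mul(a):
--     ashift = (a<<1)%0x100
--     if (a&0x80 == 0):
--         return ashift
--     else:
--         return ashift^0x1b
--
-- def MixMatrix(state):
--     new_state = []
--     for i in range(len(state)):
--         s = []
--         for j in range(len(state[i])):
--             r = (mul(state[i%4][j])
--                     ^mul(state[(i+1)%4][j])^state[(i+1)%4][j]
--                     ^(state[(i+2)%4][j])
--                     ^(state[(i+3)%4][j]))
--             s.append(r)
--         new_state.append(s)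
--     return new_state
-- ===== SOURCE B (Python) =====
-- C = [2, 3, 1, 1]
--
-- def xtime(x):
--     x2 = (x << 1) % 0x100
--     if x & 0x80 == 0:
--         return x2
--     return x2 ^ 0x1b
--
-- def gmul(c, x):
--     # GF(2^8) peasant multiplication over the bits of the coefficient c
--     r = 0
--     while c:
--         if c & 1:
--             r ^= x
--         c >>= 1
--         x = xtime(x)
--     return r
--
-- def MixMatrix(state):
--     new_state = []
--     for i in range(len(state)):
--         s = []
--         for j in range(len(state[i])):
--             r = 0
--             for k in range(4):
--                 r ^= gmul(C[k], state[(i + k) % 4][j])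
--             s.append(r)
--         new_state.append(s)
--     return new_state
-- ===== Notes on version B (the rewrite author's own statement) =====
-- stated objective: alternative
-- what changed: Replaces A's hand-unrolled xor-of-mul expression by a general GF(2^8) peasant multiplication gmul(c,x) driven by the MixColumns coefficient table [2,3,1,1], XOR-accumulated over k in an inner loop.
import Mathlib
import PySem

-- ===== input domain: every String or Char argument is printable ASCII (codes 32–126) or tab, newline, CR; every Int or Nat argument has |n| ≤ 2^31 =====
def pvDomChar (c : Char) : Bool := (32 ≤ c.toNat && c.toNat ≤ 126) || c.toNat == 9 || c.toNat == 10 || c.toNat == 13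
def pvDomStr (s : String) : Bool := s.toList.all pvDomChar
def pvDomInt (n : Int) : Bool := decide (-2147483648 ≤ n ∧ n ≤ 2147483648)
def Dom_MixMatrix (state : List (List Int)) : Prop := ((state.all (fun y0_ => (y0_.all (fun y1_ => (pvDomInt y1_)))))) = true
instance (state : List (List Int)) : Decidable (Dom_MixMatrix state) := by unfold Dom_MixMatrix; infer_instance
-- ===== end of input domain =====

-- B replaces A's hand-unrolled xor expression by a general GF(2^8) multiply (peasant
-- multiplication over the coefficient's bits) driven by the MixColumns coefficient
-- table [2,3,1,1]; objective: alternative (table-driven, generalisable), same cost.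

-- ===== PORT A =====
def mulA (a : Int) : Int :=
  let ashift := PySem.Int.mod (a <<< (1 : Nat)) 256
  if PySem.Int.band a 128 = 0 then ashift else PySem.Int.bxor ashift 27

def MixMatrix (state : List (List Int)) : List (List Int) :=
  (PySem.List.pyRange 0 state.length 1).foldl (fun new_state i =>
    new_state ++
      [(PySem.List.pyRange 0 (PySem.List.pyGetD state i []).length 1).foldl (fun s j =>
        s ++
          [PySem.Int.bxor
            (PySem.Int.bxor
              (PySem.Int.bxor
                (PySem.Int.bxor
                  (mulA (PySem.List.pyGetD (PySem.List.pyGetD state (PySem.Int.mod i 4) []) j 0))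
                  (mulA (PySem.List.pyGetD (PySem.List.pyGetD state (PySem.Int.mod (i + 1) 4) []) j 0)))
                (PySem.List.pyGetD (PySem.List.pyGetD state (PySem.Int.mod (i + 1) 4) []) j 0))
              (PySem.List.pyGetD (PySem.List.pyGetD state (PySem.Int.mod (i + 2) 4) []) j 0))
            (PySem.List.pyGetD (PySem.List.pyGetD state (PySem.Int.mod (i + 3) 4) []) j 0)]) []]) []

-- ===== PORT B =====
def CcoefB : List Int := [2, 3, 1, 1]

def xtimeB (x : Int) : Int :=
  let x2 := PySem.Int.mod (x <<< (1 : Nat)) 256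
  if PySem.Int.band x 128 = 0 then x2 else PySem.Int.bxor x2 27

-- Source B's 'while c:' loop over the bits of the (nonnegative) coefficient c
def gmulAuxB (c : Nat) (x r : Int) : Int :=
  if c = 0 then r
  else gmulAuxB (c / 2) (xtimeB x) (if c % 2 = 1 then PySem.Int.bxor r x else r)
termination_by c
decreasing_by omega

def gmulB (c x : Int) : Int := gmulAuxB c.toNat x 0

def MixMatrix_alt (state : List (List Int)) : List (List Int) :=
  (PySem.List.pyRange 0 state.length 1).foldl (fun new_state i =>
    new_state ++
      [(PySem.List.pyRange 0 (PySem.List.pyGetD state i []).length 1).foldl (fun s j =>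
        s ++
          [(PySem.List.pyRange 0 4 1).foldl (fun r k =>
            PySem.Int.bxor r
              (gmulB (PySem.List.pyGetD CcoefB k 0)
                (PySem.List.pyGetD (PySem.List.pyGetD state (PySem.Int.mod (i + k) 4) []) j 0))) 0]) []]) []

-- ===== PRECONDITION & SPEC =====
-- Pre_ excludes exactly the inputs where the Python A raises IndexError: a nonempty row
-- forces the accesses state[(i+k)%4][j], which need at least 4 rows and rows 0..3 at
-- least as long as the row being processed.
def Pre_MixMatrix (state : List (List Int)) : Prop :=
  ∀ row ∈ state, row ≠ [] →
    4 ≤ state.length ∧ ∀ m ∈ ([0, 1, 2, 3] : List Nat), row.length ≤ (state.getD m []).length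
instance (state : List (List Int)) : Decidable (Pre_MixMatrix state) := by
  unfold Pre_MixMatrix; infer_instance

def pvWitness_MixMatrix : List (List Int) := [[1, 200], [2, 19], [130, 3], [77, 4]]

def Spec_MixMatrix (state : List (List Int)) (out : List (List Int)) : Prop := out = MixMatrix_alt state
instance (state : List (List Int)) (out : List (List Int)) : Decidable (Spec_MixMatrix state out) := by unfold Spec_MixMatrix; infer_instance

-- ===== CLAIM (what is proved, stated in full; the proofs are below) =====
def Claim_equal_MixMatrix : Prop := ∀ (state : List (List Int)), Dom_MixMatrix state → Pre_MixMatrix state → Spec_MixMatrix state (MixMatrix state)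

-- ===== LEMMAS AND PROOFS =====

-- gmul reductions at the three coefficients that occur
theorem gmulB_one (x : Int) : gmulB 1 x = PySem.Int.bxor 0 x := by
  unfold gmulB; rw [gmulAuxB, gmulAuxB]; simp only [show Int.toNat 1 = 1 from rfl]; norm_num

theorem gmulB_two (x : Int) : gmulB 2 x = PySem.Int.bxor 0 (xtimeB x) := by
  unfold gmulB; rw [gmulAuxB, gmulAuxB, gmulAuxB]
  simp only [show Int.toNat 2 = 2 from rfl]; norm_num

theorem gmulB_three (x : Int) :
    gmulB 3 x = PySem.Int.bxor (PySem.Int.bxor 0 x) (xtimeB x) := by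
  unfold gmulB; rw [gmulAuxB, gmulAuxB, gmulAuxB]
  simp only [show Int.toNat 3 = 3 from rfl]; norm_num

theorem zero_bxor (x : Int) : PySem.Int.bxor 0 x = x := by
  rw [PySem.Int.bxor_comm]; exact PySem.Int.bxor_zero x

theorem xtimeB_nonneg (x : Int) : 0 ≤ xtimeB x := by
  unfold xtimeB
  have h : (0 : Int) ≤ PySem.Int.mod (x <<< (1 : Nat)) 256 := PySem.Int.mod_nonneg _ (by norm_num)
  split
  · exact h
  · rw [PySem.Int.bxor_of_nonneg h (by norm_num)]; positivity

-- the one rearrangement the proof needs: with both x and y nonnegative,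
-- (x ^ y) ^ b = x ^ (b ^ y)
theorem bxor_natCast_negSucc (m n : Nat) :
    PySem.Int.bxor (m : Int) (Int.negSucc n) = Int.negSucc (m ^^^ n) := by
  unfold PySem.Int.bxor
  rw [if_pos (by positivity), if_neg (by omega)]
  have h1 : (-(Int.negSucc n) - 1).toNat = n := by
    rw [Int.negSucc_eq]; omega
  rw [h1, Int.toNat_natCast, Int.negSucc_eq]
  ring

-- the one rearrangement the proof needs: with both x and y nonnegative,
-- (x ^ y) ^ b = x ^ (b ^ y)
theorem bxor_swap (x y b : Int) (hx : 0 ≤ x) (hy : 0 ≤ y) :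
    PySem.Int.bxor (PySem.Int.bxor x y) b = PySem.Int.bxor x (PySem.Int.bxor b y) := by
  lift x to ℕ using hx
  lift y to ℕ using hy
  rcases b with n | n
  · rw [PySem.Int.bxor_natCast, Int.ofNat_eq_natCast, PySem.Int.bxor_natCast,
      PySem.Int.bxor_comm (n : Int), PySem.Int.bxor_natCast, PySem.Int.bxor_natCast]
    rw [Nat.xor_assoc]
  · rw [PySem.Int.bxor_natCast, bxor_natCast_negSucc,
      PySem.Int.bxor_comm (Int.negSucc n), bxor_natCast_negSucc, bxor_natCast_negSucc,
      Nat.xor_assoc]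

theorem mulA_eq_xtimeB (a : Int) : mulA a = xtimeB a := rfl

theorem range4 : PySem.List.pyRange 0 4 1 = [0, 1, 2, 3] := by decide

-- pointwise agreement of the two inner expressions
theorem cellwise (state : List (List Int)) (i j : Int) :
    PySem.Int.bxor
      (PySem.Int.bxor
        (PySem.Int.bxor
          (PySem.Int.bxor
            (mulA (PySem.List.pyGetD (PySem.List.pyGetD state (PySem.Int.mod i 4) []) j 0))
            (mulA (PySem.List.pyGetD (PySem.List.pyGetD state (PySem.Int.mod (i + 1) 4) []) j 0)))
          (PySem.List.pyGetD (PySem.List.pyGetD state (PySem.Int.mod (i + 1) 4) []) j 0))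
        (PySem.List.pyGetD (PySem.List.pyGetD state (PySem.Int.mod (i + 2) 4) []) j 0))
      (PySem.List.pyGetD (PySem.List.pyGetD state (PySem.Int.mod (i + 3) 4) []) j 0)
    = (PySem.List.pyRange 0 4 1).foldl (fun r k =>
        PySem.Int.bxor r
          (gmulB (PySem.List.pyGetD CcoefB k 0)
            (PySem.List.pyGetD (PySem.List.pyGetD state (PySem.Int.mod (i + k) 4) []) j 0))) 0 := by
  rw [range4]
  simp only [List.foldl]
  have c0 : PySem.List.pyGetD CcoefB 0 0 = 2 := by decide
  have c1 : PySem.List.pyGetD CcoefB 1 0 = 3 := by decide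
  have c2 : PySem.List.pyGetD CcoefB 2 0 = 1 := by decide
  have c3 : PySem.List.pyGetD CcoefB 3 0 = 1 := by decide
  rw [c0, c1, c2, c3, add_zero, gmulB_one, gmulB_one, gmulB_two, gmulB_three]
  rw [zero_bxor, zero_bxor, zero_bxor, zero_bxor, zero_bxor]
  rw [mulA_eq_xtimeB, mulA_eq_xtimeB]
  rw [bxor_swap _ _ _ (xtimeB_nonneg _) (xtimeB_nonneg _)]

-- ===== VERDICT (by name: the statement is the Claim_ definition above) =====
theorem MixMatrix_spec : Claim_equal_MixMatrix := by
  intro state _ _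
  unfold Spec_MixMatrix MixMatrix MixMatrix_alt
  rw [PySem.List.foldl_append_singleton_eq_map, PySem.List.foldl_append_singleton_eq_map]
  refine List.map_congr_left (fun i _ => ?_)
  rw [PySem.List.foldl_append_singleton_eq_map, PySem.List.foldl_append_singleton_eq_map]
  exact List.map_congr_left (fun j _ => cellwise state i j)
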